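-- pv_equiv track=rewrite | github.com/Python-study-f/Algorithm-study_1H | Programmers/Hash_Table/Phone_List_42577/42577_210309_jjong.py | solution
-- ===== SOURCE A (Python) =====
-- def solution(phone_book):
--     answer =True
--     hash_map = {}
--
--     for phonenumber in phone_book:
--         hash_map[phonenumber] = 1
--
--
--     for phonenumber in phone_book:
--         temp = ""
--         for number in phonenumber:
--             temp += number
--             if temp in hash_map and temp != phonenumber:
--                 answer = False
--
--     return answer
-- ===== SOURCE B (Python) =====
-- def solution(phone_book):
--     book = sorted(phone_book)
--     for prev, cur in zip(book, book[1:]):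
--         if prev and prev != cur and cur.startswith(prev):
--             return False
--     return True
-- ===== Notes on version B (the rewrite author's own statement) =====
-- stated objective: faster
-- what changed: Replaces the build-a-hash-of-all-numbers-and-test-every-proper-prefix scan with sort-then-adjacent-pair startswith check (a nonempty prefix relation in a lexicographically sorted list always occurs between adjacent elements).
import Mathlib
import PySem

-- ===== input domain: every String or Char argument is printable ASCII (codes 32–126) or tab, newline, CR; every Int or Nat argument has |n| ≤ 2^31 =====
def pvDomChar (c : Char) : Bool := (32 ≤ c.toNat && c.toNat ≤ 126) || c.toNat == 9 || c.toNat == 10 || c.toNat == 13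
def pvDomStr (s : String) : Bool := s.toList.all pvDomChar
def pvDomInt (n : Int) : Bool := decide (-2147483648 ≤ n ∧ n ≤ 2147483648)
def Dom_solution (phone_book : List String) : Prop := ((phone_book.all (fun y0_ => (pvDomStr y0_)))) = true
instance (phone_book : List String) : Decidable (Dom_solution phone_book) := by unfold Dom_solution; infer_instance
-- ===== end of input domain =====

-- B replaces A's hash-of-all-numbers + per-number proper-prefix scan by a sort-then-adjacent-pair startswith check.

-- ===== PORT A =====
-- strings are handled as their char lists (PySem convention); temp += number is temp ++ [number]
-- the dict built by A's first loop
def pvHash (phone_book : List String) : PySem.Dict (List Char) Int :=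
  phone_book.foldl (fun d phonenumber => d.insert phonenumber.toList 1) PySem.Dict.empty

def solution (phone_book : List String) : Bool :=
  let hash_map := pvHash phone_book
  phone_book.foldl (fun answer phonenumber =>
    (phonenumber.toList.foldl
      (fun (st : List Char × Bool) number =>
        (st.1 ++ [number],
         if hash_map.contains (st.1 ++ [number]) && (st.1 ++ [number] != phonenumber.toList)
         then false else st.2))
      (([] : List Char), answer)).2) true

-- ===== PORT B =====
def solution_alt (phone_book : List String) : Bool :=
  let book := PySem.List.sorted phone_book (fun x => x) false
  !((book.zip book.tail).any (fun pc =>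
      pc.1 != "" && (pc.1 != pc.2 && PySem.Str.startswith pc.2 pc.1)))

-- ===== PRECONDITION & SPEC =====
def Spec_solution (phone_book : List String) (out : Bool) : Prop := out = solution_alt phone_book
instance (phone_book : List String) (out : Bool) : Decidable (Spec_solution phone_book out) := by unfold Spec_solution; infer_instance

-- ===== CLAIM (what is proved, stated in full; the proofs are below) =====
def Claim_equal_solution : Prop := ∀ (phone_book : List String), Dom_solution phone_book → Spec_solution phone_book (solution phone_book)

-- ===== LEMMAS AND PROOFS =====

-- "some number of the book is a proper prefix of another"
def pvP (pb : List String) : Prop := ∃ x ∈ pb, ∃ y ∈ pb, x ≠ "" ∧ x ≠ y ∧ x.toList <+: y.toList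

lemma pv_ne_empty_iff {x : String} : x ≠ "" ↔ x.toList ≠ [] := by
  rw [ne_eq, ne_eq, ← String.toList_inj, show ("" : String).toList = [] from by decide]

lemma pv_string_lt_iff {x y : String} : x < y ↔ List.Lex (· < ·) x.toList y.toList :=
  String.lt_iff_toList_lt.trans Iff.rfl

-- a proper prefix is lexicographically smaller (char lists)
lemma pv_lex_of_prefix_ne {x y : List Char} (hp : x <+: y) (hne : x ≠ y) :
    List.Lex (· < ·) x y := by
  obtain ⟨r, rfl⟩ := hp
  induction x with
  | nil =>
    cases r with
    | nil => simp at hne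
    | cons c r => exact List.Lex.nil
  | cons c x ih => exact List.Lex.cons (ih (by simpa using hne))

-- between two lists both lex-≥ a and lex-≤ y, a prefix of y forces a prefix of the middle one
lemma pv_prefix_of_between {a b y : List Char}
    (hab : ¬ List.Lex (· < ·) b a) (hby : ¬ List.Lex (· < ·) y b)
    (hp : a <+: y) : a <+: b := by
  induction a generalizing b y with
  | nil => exact List.nil_prefix
  | cons c a ih =>
    obtain ⟨r, hr⟩ := hp
    cases b with
    | nil => exact absurd List.Lex.nil hab
    | cons d b =>
      cases y with
      | nil => simp at hr
      | cons e y =>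
        have hce : c = e := by simpa using congrArg (·.head?) hr
        subst hce
        have hry : a ++ r = y := by simpa using hr
        have hdc : ¬ d < c := fun h => hab (List.Lex.rel h)
        have hcd : ¬ c < d := fun h => hby (List.Lex.rel h)
        have hcd' : c = d := le_antisymm (not_lt.mp hdc) (not_lt.mp hcd)
        subst hcd'
        have h1 : ¬ List.Lex (· < ·) b a := fun h => hab (List.Lex.cons h)
        have h2 : ¬ List.Lex (· < ·) y b := fun h => hby (List.Lex.cons h)
        exact List.cons_prefix_cons.mpr ⟨rfl, ih h1 h2 ⟨r, hry⟩⟩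

lemma pv_contains_iff (pb : List String) (t : List Char) :
    (pvHash pb).contains t = true ↔ ∃ s ∈ pb, s.toList = t := by
  unfold pvHash
  rw [PySem.Dict.contains_iff_mem_keys,
      PySem.Dict.keys_foldl_insert_key (key := String.toList) (f := fun _ _ => (1 : Int))]
  simp [PySem.Dict.keys_empty, PySem.Set.update_nil_left, PySem.Set.mem_ofList, List.mem_map]

lemma pv_inner (test : List Char → Bool) (cs : List Char) : ∀ (t0 : List Char) (a : Bool),
    (cs.foldl (fun (st : List Char × Bool) c =>
        (st.1 ++ [c], if test (st.1 ++ [c]) then false else st.2)) (t0, a))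
      = (t0 ++ cs, a && !((List.range cs.length).any (fun k => test (t0 ++ cs.take (k+1))))) := by
  induction cs with
  | nil => intro t0 a; simp
  | cons c cs ih =>
    intro t0 a
    rw [List.foldl_cons, ih]
    cases hg : test (t0 ++ [c]) <;>
      simp [hg, List.range_succ_eq_map, Function.comp_def, List.append_assoc]

def pvC (pb : List String) (y : String) : Bool :=
  (List.range y.toList.length).any (fun k =>
    (pvHash pb).contains (y.toList.take (k+1)) && (y.toList.take (k+1) != y.toList))

lemma pv_solution_eq (pb : List String) : solution pb = !(pb.any (pvC pb)) := by
  have hba : ∀ (a b : Bool), (a && !b) = if b then false else a := by decide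
  unfold solution
  simp only []
  rw [show (fun (answer : Bool) (phonenumber : String) =>
        (phonenumber.toList.foldl
          (fun (st : List Char × Bool) number =>
            (st.1 ++ [number],
             if (pvHash pb).contains (st.1 ++ [number]) && (st.1 ++ [number] != phonenumber.toList)
             then false else st.2)) (([] : List Char), answer)).2)
      = (fun a y => if pvC pb y then false else a) from funext fun a => funext fun y => by
        rw [pv_inner (fun t => (pvHash pb).contains t && (t != y.toList)) y.toList [] a]
        exact hba a (pvC pb y)]
  rw [PySem.List.foldl_if_false_eq]
  simp

lemma pv_A_char (pb : List String) :
    solution pb = false ↔ pvP pb := by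
  rw [pv_solution_eq, Bool.not_eq_false', List.any_eq_true]
  constructor
  · rintro ⟨y, hy, hc⟩
    unfold pvC at hc
    rw [List.any_eq_true] at hc
    obtain ⟨k, hk, ht⟩ := hc
    rw [List.mem_range] at hk
    rw [Bool.and_eq_true, bne_iff_ne] at ht
    obtain ⟨hcont, hne⟩ := ht
    obtain ⟨s, hs, hst⟩ := (pv_contains_iff pb _).mp hcont
    refine ⟨s, hs, y, hy, ?_, ?_, ?_⟩
    · refine pv_ne_empty_iff.mpr ?_
      rw [hst]
      have : (y.toList.take (k+1)).length = k + 1 := by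
        rw [List.length_take]; omega
      intro h; rw [h] at this; simp at this
    · intro h; exact hne (by rw [h] at hst; exact hst.symm)
    · rw [hst]; exact List.take_prefix _ _
  · rintro ⟨x, hx, y, hy, hx0, hne, hp⟩
    refine ⟨y, hy, ?_⟩
    unfold pvC
    rw [List.any_eq_true]
    have hxnil : x.toList ≠ [] := pv_ne_empty_iff.mp hx0
    have hlen : 0 < x.toList.length := List.length_pos_iff.mpr hxnil
    have htake : y.toList.take x.toList.length = x.toList :=
      (List.prefix_iff_eq_take.mp hp).symm
    refine ⟨x.toList.length - 1, ?_, ?_⟩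
    · rw [List.mem_range]
      have := hp.length_le
      omega
    · have h1 : x.toList.length - 1 + 1 = x.toList.length := by omega
      rw [h1, htake, Bool.and_eq_true, bne_iff_ne]
      exact ⟨(pv_contains_iff pb _).mpr ⟨x, hx, rfl⟩,
        fun h => hne (String.toList_inj.mp h)⟩

lemma pv_adj (g : String × String → Bool)
    (hg : ∀ p c : String, g (p, c) = (p != "" && (p != c && PySem.Str.startswith c p))) :
    ∀ (l : List String), l.Pairwise (· ≤ ·) →
    ∀ x y : String, x ∈ l → y ∈ l → x ≠ "" → x ≠ y → x.toList <+: y.toList →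
    (l.zip l.tail).any g = true := by
  intro l
  induction l with
  | nil => intro _ x y hx; simp at hx
  | cons a rest ih =>
    intro hsort x y hx hy hx0 hne hp
    cases rest with
    | nil =>
      simp only [List.mem_singleton] at hx hy
      exact absurd (hx.trans hy.symm) hne
    | cons b rest' =>
      have hzip : ((a :: b :: rest').zip (a :: b :: rest').tail)
          = (a, b) :: ((b :: rest').zip (b :: rest').tail) := rfl
      have hsort' : (b :: rest').Pairwise (· ≤ ·) := hsort.tail
      rw [hzip, List.any_cons, Bool.or_eq_true]
      rcases List.mem_cons.mp hx with hxa | hxr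
      · subst hxa
        rcases List.mem_cons.mp hy with hya | hyr
        · exact absurd hya.symm hne
        · -- x is the head, y is in the tail
          have hab : x ≤ b := (List.pairwise_cons.mp hsort).1 b List.mem_cons_self
          have hby : b ≤ y := by
            rcases List.mem_cons.mp hyr with hyb | hyr'
            · exact hyb ▸ le_refl b
            · exact (List.pairwise_cons.mp hsort').1 y hyr'
          have hpre : x.toList <+: b.toList :=
            pv_prefix_of_between
              (fun h => absurd (pv_string_lt_iff.mpr h) (not_lt.mpr hab))
              (fun h => absurd (pv_string_lt_iff.mpr h) (not_lt.mpr hby)) hp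
          by_cases hxb : x = b
          · -- duplicate head: x appears again in the tail, recurse
            exact Or.inr (ih hsort' x y (hxb ▸ List.mem_cons_self) hyr hx0 hne hp)
          · refine Or.inl ?_
            rw [hg, Bool.and_eq_true, Bool.and_eq_true, bne_iff_ne, bne_iff_ne]
            refine ⟨hx0, hxb, ?_⟩
            simpa [PySem.Chars.startswith_iff] using hpre
      · rcases List.mem_cons.mp hy with hya | hyr
        · -- y is the head, x in the tail: contradicts sortedness
          subst hya
          have hax : y ≤ x := (List.pairwise_cons.mp hsort).1 x hxr
          exact absurd (pv_string_lt_iff.mpr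
              (pv_lex_of_prefix_ne hp (fun h => hne (String.toList_inj.mp h))))
            (not_lt.mpr hax)
        · exact Or.inr (ih hsort' x y hxr hyr hx0 hne hp)

lemma pv_B_char (pb : List String) : solution_alt pb = false ↔ pvP pb := by
  unfold solution_alt
  simp only []
  rw [Bool.not_eq_false', List.any_eq_true]
  have hmemb : ∀ z : String, z ∈ PySem.List.sorted pb (fun x => x) false ↔ z ∈ pb :=
    fun z => PySem.List.mem_sorted pb (fun x => x) false z
  constructor
  · rintro ⟨⟨p, c⟩, hmem, hgt⟩
    have hm := List.of_mem_zip hmem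
    have hpb : p ∈ pb := (hmemb p).mp hm.1
    have hcb : c ∈ pb := (hmemb c).mp (List.mem_of_mem_tail hm.2)
    rw [Bool.and_eq_true, Bool.and_eq_true, bne_iff_ne, bne_iff_ne] at hgt
    refine ⟨p, hpb, c, hcb, hgt.1, hgt.2.1, ?_⟩
    have := hgt.2.2
    simpa [PySem.Chars.startswith_iff] using this
  · rintro ⟨x, hx, y, hy, hx0, hne, hp⟩
    rw [← List.any_eq_true]
    have hsorted : (PySem.List.sorted pb (fun x => x) false).Pairwise (· ≤ ·) := by
      simpa using PySem.List.sorted_pairwise (xs := pb) (key := fun x => x)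
    exact pv_adj _ (fun p c => rfl) _ hsorted x y ((hmemb x).mpr hx) ((hmemb y).mpr hy) hx0 hne hp

-- ===== VERDICT (by name: the statement is the Claim_ definition above) =====
theorem solution_spec : Claim_equal_solution := by
  intro pb _
  unfold Spec_solution
  have hA := pv_A_char pb
  have hB := pv_B_char pb
  cases h1 : solution pb <;> cases h2 : solution_alt pb
  · rfl
  · exact absurd (hB.mpr (hA.mp h1)) (by simp [h2])
  · exact absurd (hA.mpr (hB.mp h2)) (by simp [h1])
  · rfl
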